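-- pv_equiv track=rewrite | github.com/eaaskt/nlu | benchmark/data_manipulation/mix_distributions.py | remove_random
-- ===== SOURCE A (Python) =====
-- N_EXAMPLES = 1
--
-- def categorize_intents(examples_list):
--     intent_examples = dict()
--     for ex in examples_list:
--         if ex['intent'] in intent_examples:
--             intent_examples[ex['intent']].append(ex)
--         else:
--             intent_examples[ex['intent']] = [ex]
--     return intent_examples
--
-- def remove_random(examples_list, examples_to_add=None):
--     intent_examples = categorize_intents(examples_list)
--     removed = dict()
--     for intent, i_examples in intent_examples.items():
--         rm_examples = i_examples[:N_EXAMPLES]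
--         removed[intent] = rm_examples
--         del i_examples[:N_EXAMPLES]
--     if examples_to_add is not None:
--         for intent, examples in examples_to_add.items():
--             intent_examples[intent] = intent_examples[intent] + examples
--     dict_values = list(intent_examples.values())
--     flat_examples = [x for l in dict_values for x in l]
--     return flat_examples, removed
-- ===== SOURCE B (Python) =====
-- N_EXAMPLES = 1
--
-- def remove_random(examples_list, examples_to_add=None):
--     # Single routing pass: each example goes straight to removed[intent] (while it
--     # is still short of N_EXAMPLES) or to kept[intent]; no group-then-slice step.
--     removed = {}
--     kept = {}
--     for ex in examples_list:
--         intent = ex['intent']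
--         if intent not in removed:
--             removed[intent] = []
--             kept[intent] = []
--         if len(removed[intent]) < N_EXAMPLES:
--             removed[intent].append(ex)
--         else:
--             kept[intent].append(ex)
--     if examples_to_add is not None:
--         for intent, examples in examples_to_add.items():
--             kept[intent] = kept[intent] + examples
--     flat_examples = [x for l in kept.values() for x in l]
--     return flat_examples, removed
-- ===== Notes on version B (the rewrite author's own statement) =====
-- stated objective: alternative
-- what changed: A groups all examples per intent into a dict and then slices each group into removed[:N] and kept[N:] in a second pass over the groups; B makes one routing pass that sends each example directly to removed[intent] or kept[intent] depending on how many that intent has already had removed.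
import Mathlib
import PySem

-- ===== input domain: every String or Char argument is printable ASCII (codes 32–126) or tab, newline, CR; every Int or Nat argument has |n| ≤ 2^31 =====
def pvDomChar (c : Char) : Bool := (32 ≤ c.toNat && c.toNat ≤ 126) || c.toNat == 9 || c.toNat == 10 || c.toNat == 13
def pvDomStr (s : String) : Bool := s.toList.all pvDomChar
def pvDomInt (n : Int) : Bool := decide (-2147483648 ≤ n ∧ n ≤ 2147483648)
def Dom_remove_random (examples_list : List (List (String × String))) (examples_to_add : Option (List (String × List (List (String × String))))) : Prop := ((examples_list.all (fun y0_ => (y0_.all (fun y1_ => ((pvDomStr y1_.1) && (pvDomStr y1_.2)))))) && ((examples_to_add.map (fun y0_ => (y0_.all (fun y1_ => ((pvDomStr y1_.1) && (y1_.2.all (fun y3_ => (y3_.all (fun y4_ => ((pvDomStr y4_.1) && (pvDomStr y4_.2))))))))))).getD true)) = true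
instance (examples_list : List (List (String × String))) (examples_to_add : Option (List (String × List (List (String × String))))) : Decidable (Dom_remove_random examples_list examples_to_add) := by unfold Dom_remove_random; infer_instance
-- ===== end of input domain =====

-- B replaces A's group-everything-then-slice-each-group pipeline by one routing pass that sends
-- each example directly to removed[intent] or kept[intent]; return value only (no input is mutated).

-- ex['intent'] in total form (the examples are dicts; Pre_ guarantees the key is present)
def pvIntentOf (ex : List (String × String)) : String :=
  ((PySem.Dict.mk ex).get? "intent").getD ""

-- ===== PORT A =====
-- helper categorize_intents: group the examples by intent (branch order as in the Python)
def pvCategorize (examples_list : List (List (String × String))) :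
    PySem.Dict String (List (List (String × String))) :=
  examples_list.foldl (fun d ex =>
    if d.contains (pvIntentOf ex) then d.modify (pvIntentOf ex) [] (fun l => l ++ [ex])
    else d.insert (pvIntentOf ex) [ex]) PySem.Dict.empty

-- N_EXAMPLES = 1 (module constant) appears as the literal 1 in the slices below.
def remove_random (examples_list : List (List (String × String))) (examples_to_add : Option (List (String × List (List (String × String))))) : (List (List (String × String))) × (List (String × List (List (String × String)))) :=
  let intent_examples := pvCategorize examples_list
  -- for intent, i_examples: removed[intent] = i_examples[:1]; del i_examples[:1]
  let st := intent_examples.items.foldl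
    (fun (st : PySem.Dict String (List (List (String × String))) × PySem.Dict String (List (List (String × String)))) q =>
      (st.1.insert q.1 (PySem.List.slice q.2 none (some 1)),
       st.2.insert q.1 (PySem.List.slice q.2 (some 1) none)))
    (PySem.Dict.empty, intent_examples)
  let removed := st.1
  -- intent_examples[intent] = intent_examples[intent] + examples (KeyError on a missing key: Pre_)
  let intent_examples2 := match examples_to_add with
    | none => st.2
    | some adds => adds.foldl (fun d (p : String × List (List (String × String))) => d.insert p.1 (d.getD p.1 [] ++ p.2)) st.2
  (intent_examples2.values.flatMap (fun l => l), removed.items)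

-- ===== PORT B =====
-- one routing step: state = (removed, kept); N_EXAMPLES = 1 is the literal 1 in the length test
def pvRoute (st : PySem.Dict String (List (List (String × String))) × PySem.Dict String (List (List (String × String)))) (ex : List (String × String)) :
    PySem.Dict String (List (List (String × String))) × PySem.Dict String (List (List (String × String))) :=
  let it := pvIntentOf ex
  let st := if st.1.contains it then st else (st.1.insert it [], st.2.insert it [])
  if (st.1.getD it []).length < 1 then (st.1.modify it [] (fun l => l ++ [ex]), st.2)
  else (st.1, st.2.modify it [] (fun l => l ++ [ex]))

def remove_random_alt (examples_list : List (List (String × String))) (examples_to_add : Option (List (String × List (List (String × String))))) : (List (List (String × String))) × (List (String × List (List (String × String)))) :=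
  let st := examples_list.foldl pvRoute (PySem.Dict.empty, PySem.Dict.empty)
  let kept := match examples_to_add with
    | none => st.2
    | some adds => adds.foldl (fun d (p : String × List (List (String × String))) => d.insert p.1 (d.getD p.1 [] ++ p.2)) st.2
  (kept.values.flatMap (fun l => l), st.1.items)

-- ===== PRECONDITION & SPEC =====
-- Pre_ excludes exactly the inputs where the Python A raises KeyError: an example without the
-- key 'intent', or an examples_to_add intent that is not the intent of any example.
def Pre_remove_random (examples_list : List (List (String × String))) (examples_to_add : Option (List (String × List (List (String × String))))) : Prop :=
  (∀ ex ∈ examples_list, "intent" ∈ ex.map Prod.fst) ∧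
  (∀ p ∈ examples_to_add.getD [], p.1 ∈ examples_list.map pvIntentOf)
instance (examples_list : List (List (String × String))) (examples_to_add : Option (List (String × List (List (String × String))))) : Decidable (Pre_remove_random examples_list examples_to_add) := by unfold Pre_remove_random; infer_instance

def pvWitness_remove_random : (List (List (String × String))) × (Option (List (String × List (List (String × String))))) :=
  ([[("intent", "a"), ("text", "x")], [("intent", "a"), ("text", "y")], [("intent", "b"), ("text", "z")]],
   some [("a", [[("intent", "a"), ("text", "w")]])])

def Spec_remove_random (examples_list : List (List (String × String))) (examples_to_add : Option (List (String × List (List (String × String))))) (out : (List (List (String × String))) × (List (String × List (List (String × String))))) : Prop := out = remove_random_alt examples_list examples_to_add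
instance (examples_list : List (List (String × String))) (examples_to_add : Option (List (String × List (List (String × String))))) (out : (List (List (String × String))) × (List (String × List (List (String × String))))) : Decidable (Spec_remove_random examples_list examples_to_add out) := by unfold Spec_remove_random; infer_instance

-- ===== CLAIM (what is proved, stated in full; the proofs are below) =====
def Claim_equal_remove_random : Prop := ∀ (examples_list : List (List (String × String))) (examples_to_add : Option (List (String × List (List (String × String))))), Dom_remove_random examples_list examples_to_add → Pre_remove_random examples_list examples_to_add → Spec_remove_random examples_list examples_to_add (remove_random examples_list examples_to_add)

-- ===== LEMMAS AND PROOFS =====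

-- the intents in first-occurrence order, and the examples of one intent
def pvK (el : List (List (String × String))) : List String := PySem.Set.ofList (el.map pvIntentOf)
def pvF (el : List (List (String × String))) (k : String) : List (List (String × String)) :=
  el.filter (fun ex => pvIntentOf ex == k)

theorem pvK_nodup (el : List (List (String × String))) : (pvK el).Nodup :=
  PySem.Set.nodup_ofList _

theorem pvCategorize_eq_modify (el : List (List (String × String))) :
    pvCategorize el =
      el.foldl (fun d ex => d.modify (pvIntentOf ex) [] (fun l => l ++ [ex])) PySem.Dict.empty := by
  unfold pvCategorize
  apply PySem.List.foldl_congr_mem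
  intro d ex _
  by_cases h : d.contains (pvIntentOf ex) = true
  · simp [h]
  · simp only [Bool.not_eq_true] at h
    simp [h, PySem.Dict.modify, PySem.Dict.getD_of_not_contains _ _ h]

theorem pvCategorize_keys (el : List (List (String × String))) :
    (pvCategorize el).keys = pvK el := by
  rw [pvCategorize_eq_modify]
  rw [PySem.Dict.keys_foldl_modify_key (key := pvIntentOf)]
  rfl

theorem pvF_append (el : List (List (String × String))) (ex : List (String × String)) (k : String) :
    pvF (el ++ [ex]) k = pvF el k ++ if pvIntentOf ex == k then [ex] else [] := by
  by_cases h : pvIntentOf ex = k <;> simp [pvF, List.filter_append, h]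

theorem pvCategorize_getD (el : List (List (String × String))) (k : String) :
    (pvCategorize el).getD k [] = pvF el k := by
  rw [pvCategorize_eq_modify]
  induction el using List.reverseRecOn with
  | nil => rfl
  | append_singleton l ex ih =>
    rw [List.foldl_append, List.foldl_cons, List.foldl_nil, PySem.Dict.getD_modify, pvF_append]
    by_cases hk : k = pvIntentOf ex
    · subst hk; simp [ih]
    · simp [hk, ih, Ne.symm hk]

theorem pvCategorize_items (el : List (List (String × String))) :
    (pvCategorize el).items = (pvK el).map (fun k => (k, pvF el k)) := by
  have hnd : (pvCategorize el).keys.Nodup := by rw [pvCategorize_keys]; exact pvK_nodup el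
  rw [PySem.Dict.items_eq_map_keys _ hnd [], pvCategorize_keys]
  exact List.map_congr_left (fun k _ => by rw [pvCategorize_getD])

-- a fold of overwriting inserts at keys not containing k leaves the lookup at k unchanged
theorem pv_foldl_insert_getD_not_mem {α : Type} (f : List α → List α)
    (l : List (String × List α)) :
    ∀ (d : PySem.Dict String (List α)) (k : String), k ∉ l.map Prod.fst → ∀ (x : List α),
      (l.foldl (fun d' p => d'.insert p.1 (f p.2)) d).getD k x = d.getD k x := by
  induction l with
  | nil => intro d k _ x; rfl
  | cons q t ih =>
    intro d k h x
    simp only [List.map_cons, List.mem_cons, not_or] at h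
    simp only [List.foldl_cons]
    rw [ih _ _ h.2, PySem.Dict.getD_insert]
    simp [h.1]

theorem pv_foldl_insert_getD_mem {α : Type} (f : List α → List α)
    (l : List (String × List α)) :
    ∀ (d : PySem.Dict String (List α)), (l.map Prod.fst).Nodup →
      ∀ p ∈ l, ∀ (x : List α),
      (l.foldl (fun d' p => d'.insert p.1 (f p.2)) d).getD p.1 x = f p.2 := by
  induction l with
  | nil => intro d _ p hp; cases hp
  | cons q t ih =>
    intro d hnd p hp x
    simp only [List.map_cons, List.nodup_cons] at hnd
    simp only [List.foldl_cons]
    rcases List.mem_cons.1 hp with rfl | hp'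
    · rw [pv_foldl_insert_getD_not_mem _ _ _ _ hnd.1, PySem.Dict.getD_insert_self]
    · exact ih _ hnd.2 p hp' x

theorem pv_foldl_insert_keys {α : Type} (f : List α → List α)
    (l : List (String × List α)) :
    ∀ (d : PySem.Dict String (List α)), (∀ p ∈ l, d.contains p.1 = true) →
      (l.foldl (fun d' p => d'.insert p.1 (f p.2)) d).keys = d.keys := by
  induction l with
  | nil => intro d _; rfl
  | cons q t ih =>
    intro d h
    simp only [List.foldl_cons]
    rw [ih _ ?_, PySem.Dict.keys_insert_of_contains _ _ (h q (List.mem_cons_self ..))]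
    intro p hp
    rw [PySem.Dict.contains_insert]
    simp [h p (List.mem_cons_of_mem _ hp)]

-- overwriting every value of a nodup-keyed dict in place
theorem pv_overwrite_items {α : Type} (f : List α → List α)
    (d : PySem.Dict String (List α)) (hnd : d.keys.Nodup) :
    (d.items.foldl (fun d' p => d'.insert p.1 (f p.2)) d).items =
      d.items.map (fun p => (p.1, f p.2)) := by
  have hk : (d.items.foldl (fun d' p => d'.insert p.1 (f p.2)) d).keys = d.keys :=
    pv_foldl_insert_keys f _ d (fun p hp =>
      (PySem.Dict.contains_iff_mem_keys _ _).2 (PySem.Dict.mem_keys_of_mem_items _ hp))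
  have hnd' : (d.items.foldl (fun d' p => d'.insert p.1 (f p.2)) d).keys.Nodup := by
    rw [hk]; exact hnd
  rw [PySem.Dict.items_eq_map_keys _ hnd' [], hk]
  have : d.keys = d.items.map Prod.fst := rfl
  rw [this, List.map_map]
  refine List.map_congr_left (fun p hp => ?_)
  have := pv_foldl_insert_getD_mem f d.items d (by rw [← this]; exact hnd) p hp []
  simpa using this

theorem pvK_append (el : List (List (String × String))) (ex : List (String × String)) :
    pvK (el ++ [ex]) = PySem.Set.add (pvK el) (pvIntentOf ex) := by
  simp [pvK, PySem.Set.ofList_append_singleton]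

theorem pvF_ne_nil (el : List (List (String × String))) (k : String)
    (h : k ∈ el.map pvIntentOf) : pvF el k ≠ [] := by
  rcases List.mem_map.1 h with ⟨ex, hex, rfl⟩
  intro hnil
  have : ex ∈ pvF el (pvIntentOf ex) := List.mem_filter.2 ⟨hex, by simp⟩
  simp [hnil] at this

-- the invariant of B's routing pass
theorem pvF_nil_of_not_mem (el : List (List (String × String))) (k : String)
    (h : k ∉ el.map pvIntentOf) : pvF el k = [] := by
  rw [pvF, List.filter_eq_nil_iff]
  intro ex hex
  simp only [beq_iff_eq]
  intro hk
  exact h (List.mem_map.2 ⟨ex, hex, hk⟩)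

-- the invariant of B's routing pass
theorem pvRoute_items (el : List (List (String × String))) :
    (el.foldl pvRoute (PySem.Dict.empty, PySem.Dict.empty)).1.items =
      (pvK el).map (fun k => (k, (pvF el k).take 1)) ∧
    (el.foldl pvRoute (PySem.Dict.empty, PySem.Dict.empty)).2.items =
      (pvK el).map (fun k => (k, (pvF el k).drop 1)) := by
  induction el using List.reverseRecOn with
  | nil => constructor <;> rfl
  | append_singleton l ex ih =>
    obtain ⟨ih1, ih2⟩ := ih
    set st := l.foldl pvRoute (PySem.Dict.empty, PySem.Dict.empty) with hst
    rw [List.foldl_append, List.foldl_cons, List.foldl_nil, ← hst]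
    have hkeys1 : st.1.keys = pvK l := by
      show st.1.items.map Prod.fst = _
      rw [ih1, List.map_map]; simp [Function.comp_def]
    have hkeys2 : st.2.keys = pvK l := by
      show st.2.items.map Prod.fst = _
      rw [ih2, List.map_map]; simp [Function.comp_def]
    have hnd1 : st.1.keys.Nodup := by rw [hkeys1]; exact pvK_nodup l
    have hnd2 : st.2.keys.Nodup := by rw [hkeys2]; exact pvK_nodup l
    by_cases hmem : pvIntentOf ex ∈ pvK l
    · -- already-seen intent: the example is routed to kept
      have hct : st.1.contains (pvIntentOf ex) = true := by
        rw [PySem.Dict.contains_eq_decide_mem_keys, hkeys1]; simpa using hmem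
      have hct2 : st.2.contains (pvIntentOf ex) = true := by
        rw [PySem.Dict.contains_eq_decide_mem_keys, hkeys2]; simpa using hmem
      have hFne : pvF l (pvIntentOf ex) ≠ [] :=
        pvF_ne_nil l _ ((PySem.Set.mem_ofList _ _).1 hmem)
      have hFlen : 1 ≤ (pvF l (pvIntentOf ex)).length := by
        have := List.length_pos_of_ne_nil hFne; omega
      have hgetD : st.1.getD (pvIntentOf ex) [] = (pvF l (pvIntentOf ex)).take 1 :=
        PySem.Dict.getD_of_mem_items _
          (by rw [ih1]; exact List.mem_map.2 ⟨_, hmem, rfl⟩) hnd1 []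
      have hgetD2 : st.2.getD (pvIntentOf ex) [] = (pvF l (pvIntentOf ex)).drop 1 :=
        PySem.Dict.getD_of_mem_items _
          (by rw [ih2]; exact List.mem_map.2 ⟨_, hmem, rfl⟩) hnd2 []
      have hcond : ¬ (st.1.getD (pvIntentOf ex) []).length < 1 := by
        rw [hgetD]; simp [hFlen]
      rw [pvK_append, PySem.Set.add_of_mem hmem]
      simp only [pvRoute, hct, if_true, if_neg hcond]
      constructor
      · rw [ih1]
        refine List.map_congr_left (fun k hk => ?_)
        rw [pvF_append]
        by_cases hke : pvIntentOf ex = k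
        · subst hke
          rw [if_pos (by simp), List.take_append_of_le_length hFlen]
        · simp [hke]
      · rw [PySem.Dict.modify, hgetD2,
          PySem.Dict.items_insert_of_contains _ _ hct2, ih2, List.map_map]
        refine List.map_congr_left (fun k hk => ?_)
        simp only [Function.comp_apply]
        rw [pvF_append]
        by_cases hke : pvIntentOf ex = k
        · subst hke
          rw [if_pos (by simp), List.drop_append_of_le_length hFlen]
          simp
        · have : (k == pvIntentOf ex) = false := by simpa using Ne.symm hke
          simp [this, hke]
    · -- new intent: create removed[it] = [ex] and kept[it] = []
      have hct : st.1.contains (pvIntentOf ex) = false := by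
        rw [PySem.Dict.contains_eq_decide_mem_keys, hkeys1]; simpa using hmem
      have hct2 : st.2.contains (pvIntentOf ex) = false := by
        rw [PySem.Dict.contains_eq_decide_mem_keys, hkeys2]; simpa using hmem
      have hFnil : pvF l (pvIntentOf ex) = [] :=
        pvF_nil_of_not_mem l _ (fun hc => hmem ((PySem.Set.mem_ofList _ _).2 hc))
      rw [pvK_append, PySem.Set.add_of_not_mem hmem]
      simp only [pvRoute, hct, Bool.false_eq_true, if_false,
        PySem.Dict.getD_insert_self, List.length_nil, Nat.zero_lt_one, if_true,
        PySem.Dict.modify, PySem.Dict.insert_insert_self, List.nil_append]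
      constructor
      · rw [PySem.Dict.items_insert_of_not_contains _ _ hct, ih1, List.map_append]
        congr 1
        · refine List.map_congr_left (fun k hk => ?_)
          rw [pvF_append]
          have hke : pvIntentOf ex ≠ k := fun h => hmem (h ▸ hk)
          simp [hke]
        · simp [pvF_append, hFnil]
      · rw [PySem.Dict.items_insert_of_not_contains _ _ hct2, ih2, List.map_append]
        congr 1
        · refine List.map_congr_left (fun k hk => ?_)
          rw [pvF_append]
          have hke : pvIntentOf ex ≠ k := fun h => hmem (h ▸ hk)
          simp [hke]
        · simp [pvF_append, hFnil]

theorem pv_slice_take1 {α : Type} (xs : List α) :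
    PySem.List.slice xs none (some 1) = xs.take 1 := by
  rw [PySem.List.slice_to] <;> norm_num

theorem pv_slice_drop1 {α : Type} (xs : List α) :
    PySem.List.slice xs (some 1) none = xs.drop 1 := by
  rw [PySem.List.slice_from] <;> norm_num

-- ===== VERDICT (by name: the statement is the Claim_ definition above) =====
theorem remove_random_spec : Claim_equal_remove_random := by
  intro el eta _ _
  show remove_random el eta = remove_random_alt el eta
  have hg := pvCategorize_items el
  have hgnd : (pvCategorize el).keys.Nodup := by
    rw [pvCategorize_keys]; exact pvK_nodup el
  obtain ⟨hb1, hb2⟩ := pvRoute_items el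
  have hremA : ((pvCategorize el).items.foldl
      (fun (d : PySem.Dict String (List (List (String × String)))) q =>
        d.insert q.1 (PySem.List.slice q.2 none (some 1))) PySem.Dict.empty).items
      = (pvK el).map (fun k => (k, (pvF el k).take 1)) := by
    rw [PySem.Dict.items_foldl_insert_fresh _ Prod.fst
      (fun q => PySem.List.slice q.2 none (some 1)) _ (fun a _ => by simp) hgnd]
    rw [hg, List.map_map]
    simp [pv_slice_take1, PySem.Dict.empty, Function.comp_def]
  have hieB : (pvCategorize el).items.foldl
      (fun (d : PySem.Dict String (List (List (String × String)))) q =>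
        d.insert q.1 (PySem.List.slice q.2 (some 1) none)) (pvCategorize el)
      = (el.foldl pvRoute (PySem.Dict.empty, PySem.Dict.empty)).2 := by
    refine PySem.Dict.ext ?_
    rw [pv_overwrite_items (fun v => PySem.List.slice v (some 1) none) _ hgnd,
      hg, List.map_map, hb2]
    exact List.map_congr_left (fun k _ => by simp [pv_slice_drop1])
  have hsplit : (pvCategorize el).items.foldl
      (fun (st : PySem.Dict String (List (List (String × String))) × PySem.Dict String (List (List (String × String)))) q =>
        (st.1.insert q.1 (PySem.List.slice q.2 none (some 1)),
         st.2.insert q.1 (PySem.List.slice q.2 (some 1) none)))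
      (PySem.Dict.empty, pvCategorize el)
      = ((pvCategorize el).items.foldl
          (fun d q => d.insert q.1 (PySem.List.slice q.2 none (some 1))) PySem.Dict.empty,
         (pvCategorize el).items.foldl
          (fun d q => d.insert q.1 (PySem.List.slice q.2 (some 1) none)) (pvCategorize el)) :=
    PySem.List.foldl_prod_mk
      (fun (d : PySem.Dict String (List (List (String × String)))) (q : String × List (List (String × String))) =>
        d.insert q.1 (PySem.List.slice q.2 none (some 1)))
      (fun (d : PySem.Dict String (List (List (String × String)))) (q : String × List (List (String × String))) =>
        d.insert q.1 (PySem.List.slice q.2 (some 1) none))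
      ((pvCategorize el).items) PySem.Dict.empty (pvCategorize el)
  simp only [remove_random, remove_random_alt]
  rw [hsplit, hieB]
  exact congrArg _ (by rw [hremA, hb1])
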